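-- pv_equiv track=rewrite | github.com/tlghealthy/gamedev_challenges | day9_1/game_correctly_fixed.py | count_consecutive_for_player
-- ===== SOURCE A (Python) =====
-- def count_consecutive_for_player(line, player):
--     """Count consecutive pieces of the specific player"""
--     max_count = 0
--     current_count = 0
--
--     for cell in line:
--         if cell == player:
--             current_count += 1
--             max_count = max(max_count, current_count)
--         else:
--             current_count = 0
--
--     return max_count
-- ===== SOURCE B (Python) =====
-- from itertools import groupby
--
--
-- def count_consecutive_for_player(line, player):
--     """Count consecutive pieces of the specific player"""
--     return max((sum(1 for _ in g) for k, g in groupby(line) if k == player),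
--                default=0)
-- ===== Notes on version B (the rewrite author's own statement) =====
-- stated objective: idiomatic
-- what changed: Replaced the hand-threaded (max_count, current_count) loop with itertools.groupby: split the line into maximal runs of equal cells, then take the max length among runs whose key equals player (default 0).
import Mathlib
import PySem

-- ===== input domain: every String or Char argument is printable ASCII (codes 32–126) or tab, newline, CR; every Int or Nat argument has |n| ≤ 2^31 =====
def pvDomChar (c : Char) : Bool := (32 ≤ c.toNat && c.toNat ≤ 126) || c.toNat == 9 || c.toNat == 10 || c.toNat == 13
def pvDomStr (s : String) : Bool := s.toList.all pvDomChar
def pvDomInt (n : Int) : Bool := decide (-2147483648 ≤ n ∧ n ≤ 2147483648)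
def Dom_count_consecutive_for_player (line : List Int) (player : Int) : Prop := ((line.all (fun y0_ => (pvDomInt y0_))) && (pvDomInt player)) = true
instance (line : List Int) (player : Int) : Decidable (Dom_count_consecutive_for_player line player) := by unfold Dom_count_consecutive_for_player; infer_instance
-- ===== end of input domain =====

-- B replaces A's running-counter loop with a groupby-style decomposition: build maximal runs, then take the max matching run length (idiomatic; same O(n) cost).


-- ===== PORT A =====
-- A: fold the loop state (max_count, current_count) over the line.
def count_consecutive_for_player (line : List Int) (player : Int) : Int :=
  (line.foldl (fun (st : Int × Int) cell =>
      if cell = player then (max st.1 (st.2 + 1), st.2 + 1) else (st.1, 0))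
    (0, 0)).1

-- ===== PORT B =====
-- B: itertools.groupby ported by hand: pvRuns builds the maximal runs of equal
-- cells as (key, length) pairs front-to-back, then we reduce to the max length
-- among runs whose key equals player (default 0), exactly as Source B's generator.
def pvRunsFrom (x n : Int) : List Int → List (Int × Int)
  | [] => [(x, n)]
  | y :: ys => if y = x then pvRunsFrom x (n + 1) ys else (x, n) :: pvRunsFrom y 1 ys

def pvRuns : List Int → List (Int × Int)
  | [] => []
  | x :: xs => pvRunsFrom x 1 xs

def count_consecutive_for_player_alt (line : List Int) (player : Int) : Int :=
  (pvRuns line).foldl (fun acc kn => if kn.1 = player then max acc kn.2 else acc) 0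

-- ===== PRECONDITION & SPEC =====
def Spec_count_consecutive_for_player (line : List Int) (player : Int) (out : Int) : Prop := out = count_consecutive_for_player_alt line player
instance (line : List Int) (player : Int) (out : Int) : Decidable (Spec_count_consecutive_for_player line player out) := by unfold Spec_count_consecutive_for_player; infer_instance

-- ===== CLAIM (what is proved, stated in full; the proofs are below) =====
def Claim_equal_count_consecutive_for_player : Prop := ∀ (line : List Int) (player : Int), Dom_count_consecutive_for_player line player → Spec_count_consecutive_for_player line player (count_consecutive_for_player line player)

-- ===== LEMMAS AND PROOFS =====
lemma pv_max_assoc_succ (m n : Int) : max (max m n) (n + 1) = max m (n + 1) := by omega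

lemma pv_run_fold (player : Int) :
    ∀ (xs : List Int) (x n m : Int),
      (pvRunsFrom x n xs).foldl
          (fun acc kn => if kn.1 = player then max acc kn.2 else acc) m
        = (xs.foldl (fun (st : Int × Int) cell =>
              if cell = player then (max st.1 (st.2 + 1), st.2 + 1) else (st.1, 0))
            (if x = player then max m n else m, if x = player then n else 0)).1 := by
  intro xs
  induction xs with
  | nil =>
      intro x n m
      simp [pvRunsFrom]
  | cons y ys ih =>
      intro x n m
      by_cases hxy : y = x
      · subst hxy
        rw [pvRunsFrom, if_pos rfl, ih, List.foldl_cons]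
        by_cases hp : y = player
        · rw [if_pos hp]
          simp only [hp, if_true]
          rw [pv_max_assoc_succ]
        · simp [hp]
      · rw [pvRunsFrom, if_neg hxy, List.foldl_cons, ih, List.foldl_cons]
        by_cases hp : y = player
        · have hx : x ≠ player := fun h => hxy (hp.trans h.symm)
          simp [hp, hx]
        · by_cases hx : x = player
          · simp [hp, hx]
          · simp [hp, hx]

-- ===== VERDICT (by name: the statement is the Claim_ definition above) =====
theorem count_consecutive_for_player_spec : Claim_equal_count_consecutive_for_player := by
  intro line player _
  unfold Spec_count_consecutive_for_player count_consecutive_for_player count_consecutive_for_player_alt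
  cases line with
  | nil => simp [pvRuns]
  | cons x xs =>
      rw [pvRuns, pv_run_fold]
      by_cases hx : x = player
      · subst hx
        simp
      · simp [hx]
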